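-- pv_equiv track=rewrite | github.com/aff4/pyaff4 | pyaff4/turtle.py | toDirectivesAndTripes
-- ===== SOURCE A (Python) =====
-- def toDirectivesAndTripes(text):
--     directives = []
--     triples = []
--
--     in_directives = True
--     for line in text.splitlines():
--         if in_directives:
--             if line.startswith("@"):
--                 directives.append(line)
--                 continue
--             elif line == "":
--                 in_directives = False
--         else:
--             triples.append(line)
--
--     return (u"\r\n".join(directives), u"\r\n".join(triples))
-- ===== SOURCE B (Python) =====
-- def toDirectivesAndTripes(text):
--     lines = text.splitlines()
--     try:
--         idx = lines.index("")
--     except ValueError: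
--         idx = len(lines)
--     directives = [l for l in lines[:idx] if l.startswith("@")]
--     return (u"\r\n".join(directives), u"\r\n".join(lines[idx + 1:]))
-- ===== Notes on version B (the rewrite author's own statement) =====
-- stated objective: simpler
-- what changed: Replaces the stateful in_directives flag loop with a find-the-first-empty-line-then-slice decomposition: locate the boundary with list.index, filter @-lines from the prefix, take the suffix after it.
import Mathlib
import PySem

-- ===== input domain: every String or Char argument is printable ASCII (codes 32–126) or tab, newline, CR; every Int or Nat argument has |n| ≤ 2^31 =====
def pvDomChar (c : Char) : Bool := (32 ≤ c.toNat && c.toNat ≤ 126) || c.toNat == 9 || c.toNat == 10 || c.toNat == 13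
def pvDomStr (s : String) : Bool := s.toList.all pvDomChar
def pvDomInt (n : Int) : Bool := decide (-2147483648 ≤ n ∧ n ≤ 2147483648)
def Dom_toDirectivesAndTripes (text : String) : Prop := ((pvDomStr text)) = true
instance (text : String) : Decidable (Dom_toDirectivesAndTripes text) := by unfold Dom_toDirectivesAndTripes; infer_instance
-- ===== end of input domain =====

-- B replaces A's stateful in_directives flag with find-the-first-empty-line-then-slice (simpler decomposition; same O(n) cost).

-- ===== PORT A =====
-- the loop body of A's single pass: state = (in_directives, directives, triples)
def pvStepA (st : Bool × List String × List String) (line : String) : Bool × List String × List String :=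
  if st.1 then
    if PySem.Str.startswith line "@" then (st.1, st.2.1 ++ [line], st.2.2)
    else if line == "" then (false, st.2.1, st.2.2)
    else st
  else (st.1, st.2.1, st.2.2 ++ [line])

def toDirectivesAndTripes (text : String) : String × String :=
  let st := (PySem.Str.splitlines text).foldl pvStepA (true, [], [])
  (PySem.Str.join "\r\n" st.2.1, PySem.Str.join "\r\n" st.2.2)

-- ===== PORT B =====
def toDirectivesAndTripes_alt (text : String) : String × String :=
  let lines := PySem.Str.splitlines text
  let idx : Nat := (PySem.List.index? lines "").getD lines.length
  let directives := (PySem.List.slice lines none (some (idx : Int))).filter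
    (fun l => PySem.Str.startswith l "@")
  (PySem.Str.join "\r\n" directives,
   PySem.Str.join "\r\n" (PySem.List.slice lines (some ((idx : Int) + 1)) none))

-- ===== PRECONDITION & SPEC =====
def Spec_toDirectivesAndTripes (text : String) (out : String × String) : Prop := out = toDirectivesAndTripes_alt text
instance (text : String) (out : String × String) : Decidable (Spec_toDirectivesAndTripes text out) := by unfold Spec_toDirectivesAndTripes; infer_instance

-- ===== CLAIM (what is proved, stated in full; the proofs are below) =====
def Claim_equal_toDirectivesAndTripes : Prop := ∀ (text : String), Dom_toDirectivesAndTripes text → Spec_toDirectivesAndTripes text (toDirectivesAndTripes text)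

-- ===== LEMMAS AND PROOFS =====

-- once the flag is False, A appends every remaining line to triples
theorem pvFoldA_false (ls : List String) (dirs trips : List String) :
    ls.foldl pvStepA (false, dirs, trips) = (false, dirs, trips ++ ls) := by
  induction ls generalizing trips with
  | nil => simp
  | cons l ls ih => simp [pvStepA, ih]

-- first-empty-line index steps through a nonempty head
theorem pvIndex_cons (l : String) (ls : List String) (hne : (l == "") = false) :
    PySem.List.index? (l :: ls) "" = (PySem.List.index? ls "").map (· + 1) := by
  simp [PySem.List.index?, List.idxOf?, List.findIdx?_cons, hne]

-- characterisation of A's whole pass via the index of the first empty line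
theorem pvFoldA_true (ls : List String) (dirs : List String) :
    ls.foldl pvStepA (true, dirs, []) =
      match PySem.List.index? ls "" with
      | none => (true, dirs ++ ls.filter (fun l => PySem.Str.startswith l "@"), [])
      | some i => (false, dirs ++ (ls.take i).filter (fun l => PySem.Str.startswith l "@"),
                   ls.drop (i + 1)) := by
  induction ls generalizing dirs with
  | nil => simp [PySem.List.index?]
  | cons l ls ih =>
    by_cases hsw : PySem.Str.startswith l "@"
    · have hne : (l == "") = false := by
        rcases eq_or_ne l "" with rfl | h
        · exact absurd hsw (by decide)
        · simpa using h
      have hsw' : PySem.Chars.startswith l.toList ['@'] = true := by simpa using hsw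
      have hstep : pvStepA (true, dirs, []) l = (true, dirs ++ [l], []) := by
        simp [pvStepA, hsw']
      rw [List.foldl_cons, hstep, ih, pvIndex_cons l ls hne]
      cases PySem.List.index? ls "" with
      | none => simp [hsw']
      | some i => simp [hsw']
    · by_cases hemp : l = ""
      · subst hemp
        have h0 : PySem.Chars.startswith ([] : List Char) ['@'] = false := by decide
        have hstep : pvStepA (true, dirs, []) "" = (false, dirs, []) := by
          simp [pvStepA, h0]
        have hidx : PySem.List.index? ("" :: ls) "" = some 0 := by
          simp [PySem.List.index?, List.idxOf?, List.findIdx?_cons]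
        rw [List.foldl_cons, hstep, pvFoldA_false, hidx]
        simp
      · have hne : (l == "") = false := by simpa using hemp
        have hsw' : PySem.Chars.startswith l.toList ['@'] = false := by simpa using hsw
        have hstep : pvStepA (true, dirs, []) l = (true, dirs, []) := by
          simp [pvStepA, hsw', hemp]
        rw [List.foldl_cons, hstep, ih, pvIndex_cons l ls hne]
        cases PySem.List.index? ls "" with
        | none => simp [hsw']
        | some i => simp [hsw']

-- ===== VERDICT (by name: the statement is the Claim_ definition above) =====
theorem toDirectivesAndTripes_spec : Claim_equal_toDirectivesAndTripes := by
  intro text _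
  unfold Spec_toDirectivesAndTripes toDirectivesAndTripes toDirectivesAndTripes_alt
  simp only
  rw [pvFoldA_true]
  cases h : PySem.List.index? (PySem.Str.splitlines text) "" with
  | none =>
    rw [PySem.List.slice_to _ (by positivity), PySem.List.slice_from _ (by positivity)]
    have hd : List.drop ((PySem.Str.splitlines text).length + 1) (PySem.Str.splitlines text) = [] :=
      List.drop_eq_nil_of_le (by omega)
    simp [hd]
  | some i =>
    rw [PySem.List.slice_to _ (by positivity), PySem.List.slice_from _ (by positivity)]
    have h2 : (((i : Nat) : Int) + 1).toNat = i + 1 := by omega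
    simp [h2]
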